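-- pv_equiv track=rewrite | github.com/lakigigar/Caltech-CS155-2021 | psets/set5/P3CHelpers.py | generate_onehot_dict
-- ===== SOURCE A (Python) =====
-- def generate_onehot_dict(word_list):
--     """
--     Takes a list of the words in a text file, returning a dictionary mapping
--     words to their index in a one-hot-encoded representation of the words.
--     """
--     word_to_index = {}
--     i = 0
--     for word in word_list:
--         if word not in word_to_index:
--             word_to_index[word] = i
--             i += 1
--     return word_to_index
-- ===== SOURCE B (Python) =====
-- def generate_onehot_dict(word_list):
--     """
--     Takes a list of the words in a text file, returning a dictionary mapping
--     words to their index in a one-hot-encoded representation of the words.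
--     """
--     first = {}
--     for j, w in reversed(list(enumerate(word_list))):
--         first[w] = j          # last write wins = first occurrence
--     uniq = sorted(first, key=first.get)
--     return {w: i for i, w in enumerate(uniq)}
-- ===== Notes on version B (the rewrite author's own statement) =====
-- stated objective: alternative
-- what changed: B sweeps the list in reverse overwriting a dict so that each word ends up mapped to its first-occurrence position, then SORTS the distinct words by that position and enumerates them, instead of A's single forward pass interleaving a membership test with a hand-maintained counter; correctness rests on the fact that ranking distinct words by first occurrence reproduces first-occurrence order.
import Mathlib
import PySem

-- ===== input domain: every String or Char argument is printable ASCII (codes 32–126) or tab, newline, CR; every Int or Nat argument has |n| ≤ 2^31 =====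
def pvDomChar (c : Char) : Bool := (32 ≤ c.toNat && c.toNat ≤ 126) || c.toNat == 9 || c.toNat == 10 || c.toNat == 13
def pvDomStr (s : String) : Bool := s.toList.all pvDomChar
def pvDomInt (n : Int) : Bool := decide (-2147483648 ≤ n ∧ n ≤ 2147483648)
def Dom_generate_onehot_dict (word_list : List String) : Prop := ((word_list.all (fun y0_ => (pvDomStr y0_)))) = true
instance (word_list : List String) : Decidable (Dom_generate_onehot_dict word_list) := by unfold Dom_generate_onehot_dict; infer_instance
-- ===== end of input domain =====

-- B overwrites a dict in a reverse sweep so each word maps to its first-occurrence position,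
-- then sorts the distinct words by that position, instead of A's single forward pass with a
-- membership test and a running counter.


-- ===== PORT A =====
-- one pass: membership test + hand-maintained counter i
def generate_onehot_dict (word_list : List String) : List (String × Int) :=
  (word_list.foldl
    (fun (st : PySem.Dict String Int × Int) word =>
      if ¬ (st.1.contains word = true) then (st.1.insert word st.2, st.2 + 1) else st)
    (PySem.Dict.empty, 0)).1.items

-- ===== PORT B =====
-- reverse sweep 'for j, w in reversed(list(enumerate(word_list))): first[w] = j', then
-- uniq = sorted(first, key=first.get); {w: i for i, w in enumerate(uniq)}.
-- first.get(w) is never None on the keys of first, so '.getD 0' is exact there.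
def generate_onehot_dict_alt (word_list : List String) : List (String × Int) :=
  let first := ((PySem.List.enumerate word_list 0).reverse).foldl
      (fun (d : PySem.Dict String Int) p => d.insert p.2 p.1) PySem.Dict.empty
  let uniq := PySem.List.sorted first.keys (fun w => (first.get? w).getD 0) false
  ((PySem.List.enumerate uniq 0).foldl
    (fun (d : PySem.Dict String Int) p => d.insert p.2 p.1)
    PySem.Dict.empty).items

-- ===== PRECONDITION & SPEC =====
def Spec_generate_onehot_dict (word_list : List String) (out : List (String × Int)) : Prop := out = generate_onehot_dict_alt word_list
instance (word_list : List String) (out : List (String × Int)) : Decidable (Spec_generate_onehot_dict word_list out) := by unfold Spec_generate_onehot_dict; infer_instance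

-- ===== CLAIM (what is proved, stated in full; the proofs are below) =====
def Claim_equal_generate_onehot_dict : Prop := ∀ (word_list : List String), Dom_generate_onehot_dict word_list → Spec_generate_onehot_dict word_list (generate_onehot_dict word_list)

-- ===== LEMMAS AND PROOFS =====

-- (w, index) pairs of a deduplicated prefix s
def pvPairs (s : List String) : List (String × Int) :=
  (PySem.List.enumerate s 0).map (fun p => (p.2, p.1))

theorem pvPairs_append_singleton (s : List String) (w : String) :
    pvPairs (s ++ [w]) = pvPairs s ++ [(w, (s.length : Int))] := by
  simp [pvPairs, PySem.List.enumerate_append, PySem.List.enumerate]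

theorem keys_mk_pvPairs (s : List String) :
    (PySem.Dict.mk (pvPairs s)).keys = s := by
  simp [pvPairs, PySem.Dict.keys_mk]
  exact PySem.List.map_snd_enumerate s 0

-- A's loop invariant: running the loop from the dict of a nodup prefix s (with counter s.length)
-- yields the dict of Set.update s xs
theorem pvA_loop (xs : List String) : ∀ (s : List String), s.Nodup →
    (xs.foldl
      (fun (st : PySem.Dict String Int × Int) word =>
        if ¬ (st.1.contains word = true) then (st.1.insert word st.2, st.2 + 1) else st)
      (PySem.Dict.mk (pvPairs s), (s.length : Int))).1
    = PySem.Dict.mk (pvPairs (PySem.Set.update s xs)) := by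
  induction xs with
  | nil => intro s _; simp [PySem.Set.update]
  | cons w rest ih =>
    intro s hnd
    have hkeys := keys_mk_pvPairs s
    by_cases hmem : w ∈ s
    · have hc : (PySem.Dict.mk (pvPairs s)).contains w = true := by
        rw [PySem.Dict.contains_iff_mem_keys, hkeys]; exact hmem
      have hadd : PySem.Set.add s w = s := by
        simp [PySem.Set.add, PySem.Set.contains, hmem]
      simp only [List.foldl_cons, hc]
      rw [if_neg (by decide)]
      have := ih s hnd
      simpa [PySem.Set.update, hadd] using this
    · have hc : (PySem.Dict.mk (pvPairs s)).contains w = false := by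
        rw [Bool.eq_false_iff]
        intro h
        rw [PySem.Dict.contains_iff_mem_keys, hkeys] at h
        exact hmem h
      have hins : (PySem.Dict.mk (pvPairs s)).insert w (s.length : Int)
          = PySem.Dict.mk (pvPairs (s ++ [w])) := by
        apply PySem.Dict.ext
        rw [PySem.Dict.items_insert_of_not_contains _ _ hc]
        simp [pvPairs_append_singleton]
      have hadd : PySem.Set.add s w = s ++ [w] := by
        simp [PySem.Set.add, PySem.Set.contains, hmem]
      have hlen : ((s.length : Int) + 1) = ((s ++ [w]).length : Int) := by
        simp
      simp only [List.foldl_cons, hc]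
      rw [if_pos (by decide), hins, hlen,
        ih (s ++ [w]) (by simp [List.nodup_append, hnd]; exact fun a ha h => hmem (h ▸ ha))]
      simp [PySem.Set.update, hadd]

-- set(xs) in insertion order is already strictly increasing under the key xs.index
theorem pvOfList_pairwise_idx (xs : List String) :
    (PySem.Set.ofList xs).Pairwise
      (fun a b => (PySem.List.index? xs a).getD 0 < (PySem.List.index? xs b).getD 0) := by
  induction xs using List.reverseRecOn with
  | nil => simp [PySem.Set.ofList_nil]
  | append_singleton xs x ih =>
    rw [PySem.Set.ofList_append_singleton]
    have hsub : ∀ a, a ∈ PySem.Set.ofList xs → a ∈ xs := by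
      intro a ha; exact (PySem.Set.mem_ofList xs a).1 ha
    have hsame : ∀ a ∈ PySem.Set.ofList xs,
        PySem.List.index? (xs ++ [x]) a = PySem.List.index? xs a := by
      intro a ha; exact PySem.List.index?_append_of_mem _ (hsub a ha)
    have ih' : (PySem.Set.ofList xs).Pairwise
        (fun a b => (PySem.List.index? (xs ++ [x]) a).getD 0
                  < (PySem.List.index? (xs ++ [x]) b).getD 0) := by
      refine List.Pairwise.imp_of_mem ?_ ih
      intro a b ha hb h
      rw [hsame a ha, hsame b hb]; exact h
    by_cases hmem : x ∈ xs
    · have : PySem.Set.add (PySem.Set.ofList xs) x = PySem.Set.ofList xs := by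
        simp [PySem.Set.add, PySem.Set.contains, PySem.Set.mem_ofList, hmem]
      rw [this]; exact ih'
    · have hx : x ∉ PySem.Set.ofList xs := by
        rw [PySem.Set.mem_ofList]; exact hmem
      have : PySem.Set.add (PySem.Set.ofList xs) x = PySem.Set.ofList xs ++ [x] := by
        simp [PySem.Set.add, PySem.Set.contains, hx]
      rw [this, List.pairwise_append]
      refine ⟨ih', List.pairwise_singleton _ _, ?_⟩
      intro a ha b hb
      simp only [List.mem_singleton] at hb
      subst hb
      rw [hsame a ha, PySem.List.index?_append_singleton_self xs b hmem]
      have hamem := hsub a ha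
      obtain ⟨k, hk⟩ := Option.isSome_iff_exists.mp ((PySem.List.index?_isSome_iff xs a).2 hamem)
      obtain ⟨hklt, -, -⟩ := PySem.List.getElem_of_index?_eq_some hk
      rw [hk]
      simpa using hklt

-- the reverse sweep's dict maps every word to its first-occurrence index (shifted by s)
theorem pvFirst_get? (xs : List String) : ∀ (s : Int) (w : String),
    (((PySem.List.enumerate xs s).reverse).foldl
      (fun (d : PySem.Dict String Int) p => d.insert p.2 p.1) PySem.Dict.empty).get? w
    = (PySem.List.index? xs w).map (fun k => s + (k : Int)) := by
  induction xs with
  | nil => intro s w; simp [PySem.List.enumerate_nil, PySem.Dict.get?_empty,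
      PySem.List.index?_eq_idxOf?]
  | cons x rest ih =>
    intro s w
    rw [PySem.List.enumerate_cons]
    simp only [List.reverse_cons, List.foldl_append, List.foldl_cons, List.foldl_nil]
    by_cases hwx : w = x
    · subst hwx
      rw [PySem.Dict.get?_insert_self, PySem.List.index?_cons_self]
      simp
    · rw [PySem.Dict.get?_insert, if_neg hwx, ih (s + 1) w,
        PySem.List.index?_cons_of_ne rest (Ne.symm hwx)]
      cases h : PySem.List.index? rest w with
      | none => simp
      | some k => simp; omega

-- the keys of the reverse sweep's dict are the distinct words (in last-occurrence order)
theorem pvFirst_keys (xs : List String) :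
    (((PySem.List.enumerate xs 0).reverse).foldl
      (fun (d : PySem.Dict String Int) p => d.insert p.2 p.1) PySem.Dict.empty).keys
    = PySem.Set.ofList xs.reverse := by
  have h := PySem.Dict.keys_foldl_insert_key ((PySem.List.enumerate xs 0).reverse)
    (fun p => p.2) (fun d p => p.1) PySem.Dict.empty
  rw [h]
  have : ((PySem.List.enumerate xs 0).reverse).map (fun p => p.2) = xs.reverse := by
    simp [List.map_reverse, PySem.List.map_snd_enumerate]
  rw [this, PySem.Dict.keys_empty, PySem.Set.update_nil_left]

-- sorting the keys by first-occurrence index reproduces first-occurrence order (ordered dedup)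
theorem pvUniq_eq_dedup (xs : List String) :
    (PySem.List.sorted
      (((PySem.List.enumerate xs 0).reverse).foldl
        (fun (d : PySem.Dict String Int) p => d.insert p.2 p.1) PySem.Dict.empty).keys
      (fun w => ((((PySem.List.enumerate xs 0).reverse).foldl
        (fun (d : PySem.Dict String Int) p => d.insert p.2 p.1) PySem.Dict.empty).get? w).getD 0)
      false)
    = PySem.Set.ofList xs := by
  apply PySem.List.sorted_eq_of_perm_of_pairwise_lt
  · rw [pvFirst_keys]
    rw [List.perm_ext_iff_of_nodup (PySem.Set.nodup_ofList xs) (PySem.Set.nodup_ofList xs.reverse)]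
    intro a
    rw [PySem.Set.mem_ofList, PySem.Set.mem_ofList, List.mem_reverse]
  · refine List.Pairwise.imp_of_mem ?_ (pvOfList_pairwise_idx xs)
    intro a b ha hb h
    have key_eq : ∀ c, c ∈ PySem.Set.ofList xs →
        ((((PySem.List.enumerate xs 0).reverse).foldl
          (fun (d : PySem.Dict String Int) p => d.insert p.2 p.1) PySem.Dict.empty).get? c).getD 0
        = ((PySem.List.index? xs c).getD 0 : Nat) := by
      intro c hc
      rw [pvFirst_get? xs 0 c]
      obtain ⟨k, hk⟩ := Option.isSome_iff_exists.mp
        ((PySem.List.index?_isSome_iff xs c).2 ((PySem.Set.mem_ofList xs c).1 hc))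
      rw [hk]; simp
    rw [key_eq a ha, key_eq b hb]
    exact_mod_cast h

-- B's final fold inserts fresh distinct keys, so its items are exactly pvPairs (ofList xs)
theorem pvB_items (xs : List String) :
    generate_onehot_dict_alt xs = pvPairs (PySem.Set.ofList xs) := by
  unfold generate_onehot_dict_alt
  simp only [pvUniq_eq_dedup]
  have h := PySem.Dict.items_foldl_insert_fresh
    (PySem.List.enumerate (PySem.Set.ofList xs) 0)
    (fun p => p.2) (fun p => p.1) PySem.Dict.empty
    (by intro a _; simp)
    (by rw [PySem.List.map_snd_enumerate]; exact PySem.Set.nodup_ofList xs)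
  exact h.trans (by simp [pvPairs, PySem.Dict.empty])

-- ===== VERDICT (by name: the statement is the Claim_ definition above) =====
theorem generate_onehot_dict_spec : Claim_equal_generate_onehot_dict := by
  intro word_list _
  unfold Spec_generate_onehot_dict
  rw [pvB_items]
  unfold generate_onehot_dict
  have h := pvA_loop word_list [] List.nodup_nil
  have hupd : PySem.Set.update [] word_list = PySem.Set.ofList word_list := by
    simp [PySem.Set.update, PySem.Set.ofList_eq_foldl]
  simp only [pvPairs, PySem.List.enumerate_nil, List.map_nil, List.length_nil,
    Nat.cast_zero] at h
  have hempty : (PySem.Dict.mk ([] : List (String × Int))) = PySem.Dict.empty := rfl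
  rw [hempty] at h
  rw [h, hupd]
  simp [pvPairs]
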